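-- pv_equiv track=rewrite | github.com/agpelliciari/tp0-base | server/common/communication.py | deserialize_data
-- ===== SOURCE A (Python) =====
-- FIELD_SEPARATOR = '|'
--
-- KEY_VALUE_SEPARATOR = ':'
--
-- END_MARKER = '\n'
--
-- KEY = 0
--
-- VALUE = 1
--
-- def deserialize_data(data_str):
--     """
--     Deserializa un string en formato separado a un diccionario.
--     Deserializes a string into a data dictionary
--
--     Args:
--         data_str: serialized string
--
--     Returns:
--         dictionary with the deserialized data
--     """
--     result = {}
--
--     if data_str.endswith(END_MARKER):
--         data_str = data_str[:-len(END_MARKER)]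
--
--     fields = []
--     escape = False
--     current_field = ""
--
--     for char in data_str:
--         if escape:
--             current_field += char
--             escape = False
--         elif char == '\\':
--             escape = True
--         elif char == FIELD_SEPARATOR:
--             fields.append(current_field)
--             current_field = ""
--         else:
--             current_field += char
--
--     if current_field:
--         fields.append(current_field)
--
--     for field in fields:
--         if KEY_VALUE_SEPARATOR in field:
--             parts = field.split(KEY_VALUE_SEPARATOR, VALUE)
--             result[parts[KEY]] = parts[VALUE]
--
--     return result
-- ===== SOURCE B (Python) =====
-- def _absorb(ch, seen_colon, key, value):
--     # route one payload character into the key or value buffer, switching at the first ':'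
--     if ch == ':' and not seen_colon:
--         return True
--     (value if seen_colon else key).append(ch)
--     return seen_colon
--
--
-- def deserialize_data(data_str):
--     """Single-pass deserializer: builds the dict directly while scanning,
--     with no intermediate field list and no per-field split."""
--     if data_str.endswith('\n'):
--         data_str = data_str[:-1]
--     result = {}
--     escape = False
--     seen_colon = False
--     key = []
--     value = []
--     for ch in data_str:
--         if escape:
--             escape = False
--             seen_colon = _absorb(ch, seen_colon, key, value)
--         elif ch == '\\':
--             escape = True
--         elif ch == '|':
--             if seen_colon:
--                 result[''.join(key)] = ''.join(value)
--             seen_colon = False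
--             key = []
--             value = []
--         else:
--             seen_colon = _absorb(ch, seen_colon, key, value)
--     if seen_colon:
--         result[''.join(key)] = ''.join(value)
--     return result
-- ===== Notes on version B (the rewrite author's own statement) =====
-- stated objective: alternative
-- what changed: Replaces A's two-phase design (collect unescaped fields into a list, then re-scan each field for the key-value separator and split it) with a single pass that routes each character directly into the current key or value buffer and inserts into the dict at each unescaped field separator; no field list and no split step exist in B.
import Mathlib
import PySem

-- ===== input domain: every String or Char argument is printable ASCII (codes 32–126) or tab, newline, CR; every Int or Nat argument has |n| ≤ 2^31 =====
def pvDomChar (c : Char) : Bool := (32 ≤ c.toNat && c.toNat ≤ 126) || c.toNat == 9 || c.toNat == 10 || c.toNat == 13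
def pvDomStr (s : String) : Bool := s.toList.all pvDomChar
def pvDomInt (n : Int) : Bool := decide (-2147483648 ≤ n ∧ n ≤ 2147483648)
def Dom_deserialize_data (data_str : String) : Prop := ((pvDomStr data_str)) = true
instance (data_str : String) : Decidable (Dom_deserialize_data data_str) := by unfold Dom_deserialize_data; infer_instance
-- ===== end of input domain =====

-- B replaces A's two-phase parse (field list, then per-field ':'-split) with a single pass
-- that routes characters straight into key/value and inserts at each unescaped '|' (alternative, same cost).

-- ===== PORT A =====
-- the escaped-tokenizer loop of A: state (fields, escape, current_field)
def dsStepA (st : List (List Char) × Bool × List Char) (c : Char) : List (List Char) × Bool × List Char :=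
  if st.2.1 then (st.1, false, st.2.2 ++ [c])
  else if c = '\\' then (st.1, true, st.2.2)
  else if c = '|' then (st.1 ++ [st.2.2], false, [])
  else (st.1, false, st.2.2 ++ [c])

-- A's second loop: `if ':' in field: parts = field.split(':', 1); result[parts[0]] = parts[1]`
-- split(':', 1) with ':' present is ported by hand as (part before first ':', part after it); exact there
def dsInsertField (d : PySem.Dict String String) (field : List Char) : PySem.Dict String String :=
  if field.contains ':' then
    d.insert (String.mk (field.takeWhile (· ≠ ':'))) (String.mk ((field.dropWhile (· ≠ ':')).tail))
  else d

def deserialize_data (data_str : String) : List (String × String) :=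
  let s := if PySem.Str.endswith data_str "\n" then PySem.Str.slice data_str none (some (-1)) else data_str
  let st := s.toList.foldl dsStepA ([], false, [])
  let fields := if st.2.2 ≠ [] then st.1 ++ [st.2.2] else st.1
  (fields.foldl dsInsertField PySem.Dict.empty).items

-- ===== PORT B =====
-- _absorb: route one payload character into key or value, switching at the first ':'
def dsAbsorb (c : Char) (sc : Bool) (k v : List Char) : Bool × List Char × List Char :=
  if c = ':' ∧ sc = false then (true, k, v)
  else if sc then (true, k, v ++ [c])
  else (false, k ++ [c], v)

-- B's single loop: state (result, escape, seen_colon, key, value)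
def dsStepB (st : PySem.Dict String String × Bool × Bool × List Char × List Char) (c : Char) :
    PySem.Dict String String × Bool × Bool × List Char × List Char :=
  if st.2.1 then
    let a := dsAbsorb c st.2.2.1 st.2.2.2.1 st.2.2.2.2
    (st.1, false, a.1, a.2.1, a.2.2)
  else if c = '\\' then (st.1, true, st.2.2.1, st.2.2.2.1, st.2.2.2.2)
  else if c = '|' then
    ((if st.2.2.1 then st.1.insert (String.mk st.2.2.2.1) (String.mk st.2.2.2.2) else st.1),
      false, false, [], [])
  else
    let a := dsAbsorb c st.2.2.1 st.2.2.2.1 st.2.2.2.2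
    (st.1, false, a.1, a.2.1, a.2.2)

def deserialize_data_alt (data_str : String) : List (String × String) :=
  let s := if PySem.Str.endswith data_str "\n" then PySem.Str.slice data_str none (some (-1)) else data_str
  let st := s.toList.foldl dsStepB (PySem.Dict.empty, false, false, [], [])
  (if st.2.2.1 then st.1.insert (String.mk st.2.2.2.1) (String.mk st.2.2.2.2) else st.1).items

-- ===== PRECONDITION & SPEC =====
def Spec_deserialize_data (data_str : String) (out : List (String × String)) : Prop := out = deserialize_data_alt data_str
instance (data_str : String) (out : List (String × String)) : Decidable (Spec_deserialize_data data_str out) := by unfold Spec_deserialize_data; infer_instance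

-- ===== CLAIM (what is proved, stated in full; the proofs are below) =====
def Claim_equal_deserialize_data : Prop := ∀ (data_str : String), Dom_deserialize_data data_str → Spec_deserialize_data data_str (deserialize_data data_str)

-- ===== LEMMAS AND PROOFS =====

lemma takeWhile_no_colon (k v : List Char) (hk : ':' ∉ k) :
    (k ++ ':' :: v).takeWhile (· ≠ ':') = k := by
  induction k with
  | nil => simp [List.takeWhile]
  | cons a t ih =>
    have ha : a ≠ ':' := by intro h; exact hk (h ▸ List.mem_cons_self ..)
    have ih' := ih (by intro h; exact hk (List.mem_cons_of_mem _ h))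
    simp only [List.cons_append, List.takeWhile_cons]
    simp [ha]
    simpa using ih'

lemma dropWhile_no_colon (k v : List Char) (hk : ':' ∉ k) :
    (k ++ ':' :: v).dropWhile (· ≠ ':') = ':' :: v := by
  induction k with
  | nil => simp [List.dropWhile]
  | cons a t ih =>
    have ha : a ≠ ':' := by intro h; exact hk (h ▸ List.mem_cons_self ..)
    have ih' := ih (by intro h; exact hk (List.mem_cons_of_mem _ h))
    simp only [List.cons_append, List.dropWhile_cons]
    simp [ha]
    simpa using ih'

lemma insertField_with_colon (d : PySem.Dict String String) (k v : List Char) (hk : ':' ∉ k) :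
    dsInsertField d (k ++ ':' :: v) = d.insert (String.mk k) (String.mk v) := by
  unfold dsInsertField
  rw [if_pos (by simp), takeWhile_no_colon k v hk, dropWhile_no_colon k v hk]
  rfl

lemma insertField_no_colon (d : PySem.Dict String String) (k : List Char) (hk : ':' ∉ k) :
    dsInsertField d k = d := by
  unfold dsInsertField
  rw [if_neg (by simpa using hk)]

-- the dict built from fields with one more field appended
lemma foldl_snoc_colon (fields : List (List Char)) (k v : List Char) (hk : ':' ∉ k) :
    ((fields ++ [k ++ ':' :: v]).foldl dsInsertField PySem.Dict.empty) =
    (fields.foldl dsInsertField PySem.Dict.empty).insert (String.mk k) (String.mk v) := by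
  rw [List.foldl_append, List.foldl_cons, List.foldl_nil, insertField_with_colon _ k v hk]

lemma foldl_snoc_plain (fields : List (List Char)) (k : List Char) (hk : ':' ∉ k) :
    ((fields ++ [k]).foldl dsInsertField PySem.Dict.empty) =
    fields.foldl dsInsertField PySem.Dict.empty := by
  rw [List.foldl_append, List.foldl_cons, List.foldl_nil, insertField_no_colon _ k hk]

-- finalize A's / B's loop state into the dict
def finA (st : List (List Char) × Bool × List Char) : PySem.Dict String String :=
  (if st.2.2 ≠ [] then st.1 ++ [st.2.2] else st.1).foldl dsInsertField PySem.Dict.empty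

def finB (st : PySem.Dict String String × Bool × Bool × List Char × List Char) : PySem.Dict String String :=
  if st.2.2.1 then st.1.insert (String.mk st.2.2.2.1) (String.mk st.2.2.2.2) else st.1

-- the core simulation: A's tokenizer state (fields, e, k ++ (':'::v if sc)) corresponds to
-- B's state (fold of fields, e, sc, k, v), provided ':' ∉ k and v = [] when sc is off
lemma loop_eq (cs : List Char) : ∀ (fields : List (List Char)) (e sc : Bool) (k v : List Char),
    ':' ∉ k → (sc = false → v = []) →
    finA (cs.foldl dsStepA (fields, e, k ++ (if sc then ':' :: v else []))) =
    finB (cs.foldl dsStepB (fields.foldl dsInsertField PySem.Dict.empty, e, sc, k, v)) := by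
  induction cs with
  | nil =>
    intro fields e sc k v hk hv
    cases sc with
    | true =>
      simp [finA, finB, foldl_snoc_colon fields k v hk]
    | false =>
      have hv' := hv rfl; subst hv'
      by_cases hke : k = []
      · subst hke; simp [finA, finB]
      · simp [finA, finB, hke, foldl_snoc_plain fields k hk]
  | cons c cs ih =>
    intro fields e sc k v hk hv
    simp only [List.foldl_cons]
    cases e with
    | true =>
      -- escaped character: absorbed on both sides
      cases sc with
      | true =>
        simpa [dsStepA, dsStepB, dsAbsorb] using ih fields false true k (v ++ [c]) hk (by simp)
      | false =>
        have hv' := hv rfl; subst hv'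
        by_cases hc : c = ':'
        · subst hc
          simpa [dsStepA, dsStepB, dsAbsorb] using ih fields false true k [] hk (by simp)
        · have hk' : ':' ∉ k ++ [c] := by
            simp only [List.mem_append, List.mem_singleton]
            rintro (h | h); exact hk h; exact hc h.symm
          simpa [dsStepA, dsStepB, dsAbsorb, hc] using
            ih fields false false (k ++ [c]) [] hk' (fun _ => rfl)
    | false =>
      by_cases hb : c = '\\'
      · subst hb
        simpa [dsStepA, dsStepB] using ih fields true sc k v hk hv
      · by_cases hp : c = '|'
        · subst hp
          cases sc with
          | true =>
            have h := ih (fields ++ [k ++ ':' :: v]) false false [] [] (by simp) (fun _ => rfl)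
            rw [foldl_snoc_colon fields k v hk] at h
            simpa [dsStepA, dsStepB] using h
          | false =>
            have hv' := hv rfl; subst hv'
            have h := ih (fields ++ [k]) false false [] [] (by simp) (fun _ => rfl)
            rw [foldl_snoc_plain fields k hk] at h
            simpa [dsStepA, dsStepB] using h
        · -- plain character: absorbed on both sides
          cases sc with
          | true =>
            simpa [dsStepA, dsStepB, dsAbsorb, hb, hp] using
              ih fields false true k (v ++ [c]) hk (by simp)
          | false =>
            have hv' := hv rfl; subst hv'
            by_cases hc : c = ':'
            · subst hc
              simpa [dsStepA, dsStepB, dsAbsorb, hb, hp] using ih fields false true k [] hk (by simp)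
            · have hk' : ':' ∉ k ++ [c] := by
                simp only [List.mem_append, List.mem_singleton]
                rintro (h | h); exact hk h; exact hc h.symm
              simpa [dsStepA, dsStepB, dsAbsorb, hb, hp, hc] using
                ih fields false false (k ++ [c]) [] hk' (fun _ => rfl)

-- ===== VERDICT (by name: the statement is the Claim_ definition above) =====
theorem deserialize_data_spec : Claim_equal_deserialize_data := by
  intro data_str _
  unfold Spec_deserialize_data deserialize_data deserialize_data_alt
  have h := loop_eq (if PySem.Str.endswith data_str "\n"
      then PySem.Str.slice data_str none (some (-1)) else data_str).toList
    [] false false [] [] (by simp) (fun _ => rfl)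
  simp only [finA, finB, List.foldl_nil, List.nil_append] at h
  simpa using congrArg PySem.Dict.items h
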